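-- pv_equiv track=rewrite | github.com/Vineyardcode/voynich_slop | scripts/phase89_context_divergence.py | extract_context_by_position
-- ===== SOURCE A (Python) =====
-- from collections import Counter, defaultdict
--
-- def extract_context_by_position(unit_sequences, min_units=3):
--     """Extract within-word successor/predecessor distributions by position.
--
--     For words with >= min_units units:
--       successor_data[type][pos] = Counter of within-word successors
--       predecessor_data[type][pos] = Counter of within-word predecessors
--
--     Also returns pos_counts[type] = Counter of {I: n, M: n, F: n} in
--     the analyzed words.
--     """
--     suc = defaultdict(lambda: defaultdict(Counter))
--     pre = defaultdict(lambda: defaultdict(Counter))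
--     pos_counts = defaultdict(Counter)
--
--     for units in unit_sequences:
--         n = len(units)
--         if n < min_units:
--             continue
--         for i in range(n):
--             pos = 'I' if i == 0 else ('F' if i == n - 1 else 'M')
--             u = units[i]
--             pos_counts[u][pos] += 1
--             if i < n - 1:  # has within-word successor
--                 suc[u][pos][units[i + 1]] += 1
--             if i > 0:      # has within-word predecessor
--                 pre[u][pos][units[i - 1]] += 1
--
--     return dict(suc), dict(pre), dict(pos_counts)
-- ===== SOURCE B (Python) =====
-- from collections import Counter, defaultdict, deque
--
-- def extract_context_by_position(unit_sequences, min_units=3):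
--     """Index-free re-implementation: each qualifying word is consumed
--     left-to-right as a queue while remembering the previous unit and its
--     position label; boundaries are detected structurally ('no previous
--     unit yet' / 'queue now empty'), and each edge is recorded once, when
--     its right endpoint is dequeued - no index arithmetic or range guards.
--     """
--     suc = defaultdict(lambda: defaultdict(Counter))
--     pre = defaultdict(lambda: defaultdict(Counter))
--     pos_counts = defaultdict(Counter)
--
--     for units in unit_sequences:
--         if len(units) < min_units:
--             continue
--         prev = prev_pos = None
--         rest = deque(units)
--         while rest:
--             u = rest.popleft()
--             pos = 'I' if prev is None else ('M' if rest else 'F')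
--             pos_counts[u][pos] += 1
--             if prev is not None:
--                 suc[prev][prev_pos][u] += 1
--                 pre[u][pos][prev] += 1
--             prev, prev_pos = u, pos
--
--     return dict(suc), dict(pre), dict(pos_counts)
-- ===== Notes on version B (the rewrite author's own statement) =====
-- stated objective: alternative
-- what changed: A walks each word by index over range(n) with boundary guards (i<n-1, i>0) and arithmetic position labels; B is an index-free state machine that consumes each word as a deque while carrying the previous unit and its label, detecting boundaries structurally (no previous yet / queue now empty) and recording each edge once when its right endpoint is dequeued.
import Mathlib
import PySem

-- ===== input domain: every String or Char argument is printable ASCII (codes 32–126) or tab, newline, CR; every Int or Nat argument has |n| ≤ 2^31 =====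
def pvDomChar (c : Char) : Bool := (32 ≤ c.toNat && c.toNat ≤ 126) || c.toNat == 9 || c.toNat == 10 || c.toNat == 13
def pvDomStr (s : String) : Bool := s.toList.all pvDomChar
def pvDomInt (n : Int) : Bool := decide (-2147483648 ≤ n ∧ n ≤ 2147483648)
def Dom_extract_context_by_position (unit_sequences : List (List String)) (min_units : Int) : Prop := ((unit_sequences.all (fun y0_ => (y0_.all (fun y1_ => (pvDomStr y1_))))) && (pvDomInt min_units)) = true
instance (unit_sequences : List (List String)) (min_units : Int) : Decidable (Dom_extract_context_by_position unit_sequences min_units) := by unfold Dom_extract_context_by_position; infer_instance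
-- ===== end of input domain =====

-- B replaces A's index loop (range(n) with boundary guards and arithmetic labels) by an
-- index-free state machine consuming each word as a queue while carrying the previous
-- unit and its label; same cost, genuinely different traversal.

-- Shared shorthand for the nested dict types and for the Python statements
-- `d[k1][k2] += 1` / `d[k1][k2][k3] += 1` on defaultdict(Counter) structures
-- (defaultdict access inserts the default at each level; insert keeps position
-- for existing keys and appends new ones — exactly Python's behaviour).
abbrev Cnt := PySem.Dict String Int
abbrev PD := PySem.Dict String Cnt
abbrev CD := PySem.Dict String PD

def bump2 (d : PD) (k1 k2 : String) : PD :=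
  let c := d.getD k1 PySem.Dict.empty
  d.insert k1 (c.insert k2 (c.getD k2 0 + 1))

def bump3 (d : CD) (k1 k2 k3 : String) : CD :=
  let m := d.getD k1 PySem.Dict.empty
  d.insert k1 (bump2 m k2 k3)

-- dict(...) at return time: convert the nested dicts to association lists.
def dump2 (d : PD) : List (String × List (String × Int)) :=
  d.items.map (fun p => (p.1, p.2.items))

def dump3 (d : CD) : List (String × List (String × List (String × Int))) :=
  d.items.map (fun p => (p.1, dump2 p.2))

-- ===== PORT A =====
def extract_context_by_position (unit_sequences : List (List String)) (min_units : Int) : (List (String × List (String × List (String × Int)))) × (List (String × List (String × List (String × Int)))) × (List (String × List (String × Int))) :=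
  let st := unit_sequences.foldl (fun (st : CD × CD × PD) units =>
      let n : Int := PySem.List.len units
      if n < min_units then st else
        (PySem.List.pyRange 0 n 1).foldl (fun (st : CD × CD × PD) i =>
          let pos : String := if i = 0 then "I" else if i = n - 1 then "F" else "M"
          -- units[i] with 0 ≤ i < n is always in range: pyGetD is exact here
          let u : String := PySem.List.pyGetD units i ""
          let pc := bump2 st.2.2 u pos
          let suc := if i < n - 1 then bump3 st.1 u pos (PySem.List.pyGetD units (i + 1) "") else st.1
          let pre := if 0 < i then bump3 st.2.1 u pos (PySem.List.pyGetD units (i - 1) "") else st.2.1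
          (suc, pre, pc)) st)
    (PySem.Dict.empty, PySem.Dict.empty, PySem.Dict.empty)
  (dump3 st.1, dump3 st.2.1, dump2 st.2.2)

-- ===== PORT B =====
-- the 'while rest:' queue loop of Source B: popleft is structural recursion on the list;
-- prev/prev_pos are the two Python variables (None ⇒ Option).
def walkB (suc pre : CD) (pc : PD) (prev prev_pos : Option String) : List String → CD × CD × PD
  | [] => (suc, pre, pc)
  | u :: rest =>
    let pos : String := match prev with
      | none => "I"
      | some _ => if rest.isEmpty then "F" else "M"
    let pc' := bump2 pc u pos
    let suc' := match prev with
      | some p => bump3 suc p (prev_pos.getD "") u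
      | none => suc
    let pre' := match prev with
      | some p => bump3 pre u pos p
      | none => pre
    walkB suc' pre' pc' (some u) (some pos) rest

def extract_context_by_position_alt (unit_sequences : List (List String)) (min_units : Int) : (List (String × List (String × List (String × Int)))) × (List (String × List (String × List (String × Int)))) × (List (String × List (String × Int))) :=
  let st := unit_sequences.foldl (fun (st : CD × CD × PD) units =>
      if PySem.List.len units < min_units then st
      else walkB st.1 st.2.1 st.2.2 none none units)
    (PySem.Dict.empty, PySem.Dict.empty, PySem.Dict.empty)
  (dump3 st.1, dump3 st.2.1, dump2 st.2.2)

-- ===== PRECONDITION & SPEC =====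
def Spec_extract_context_by_position (unit_sequences : List (List String)) (min_units : Int) (out : (List (String × List (String × List (String × Int)))) × (List (String × List (String × List (String × Int)))) × (List (String × List (String × Int)))) : Prop := out = extract_context_by_position_alt unit_sequences min_units
instance (unit_sequences : List (List String)) (min_units : Int) (out : (List (String × List (String × List (String × Int)))) × (List (String × List (String × List (String × Int)))) × (List (String × List (String × Int)))) : Decidable (Spec_extract_context_by_position unit_sequences min_units out) := by
  unfold Spec_extract_context_by_position
  have d1 : DecidableEq (List (String × List (String × List (String × Int)))) := fun x y => by infer_instance
  have d2 : DecidableEq (List (String × List (String × Int))) := fun x y => by infer_instance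
  exact @instDecidableEqProd _ _ d1 (@instDecidableEqProd _ _ d1 d2) _ _

-- ===== CLAIM (what is proved, stated in full; the proofs are below) =====
def Claim_equal_extract_context_by_position : Prop := ∀ (unit_sequences : List (List String)) (min_units : Int), Dom_extract_context_by_position unit_sequences min_units → Spec_extract_context_by_position unit_sequences min_units (extract_context_by_position unit_sequences min_units)

-- ===== LEMMAS AND PROOFS =====

-- A's per-index step over a fixed word w
def stepA (w : List String) (st : CD × CD × PD) (i : Int) : CD × CD × PD :=
  let n : Int := PySem.List.len w
  let pos : String := if i = 0 then "I" else if i = n - 1 then "F" else "M"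
  let u : String := PySem.List.pyGetD w i ""
  let pc := bump2 st.2.2 u pos
  let suc := if i < n - 1 then bump3 st.1 u pos (PySem.List.pyGetD w (i + 1) "") else st.1
  let pre := if 0 < i then bump3 st.2.1 u pos (PySem.List.pyGetD w (i - 1) "") else st.2.1
  (suc, pre, pc)

-- main induction: walkB on the suffix w.drop k (1 ≤ k), with prev = w[k-1], equals A's
-- fold over range(k, n); walkB performs the suc-bump for edge (k-1, k) at its first
-- step, which A performed at step k-1 — hence the shifted start state on the right.
theorem walkB_eq_fold (w : List String) (rest : List String) :
    ∀ (k : Nat), 1 ≤ k → w.drop k = rest → ∀ (suc pre : CD) (pc : PD) (labp : String),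
    walkB suc pre pc (some (PySem.List.pyGetD w ((k : Int) - 1) "")) (some labp) rest =
      (PySem.List.pyRange (k : Int) (PySem.List.len w) 1).foldl (stepA w)
        (match rest with
         | [] => (suc, pre, pc)
         | u :: _ => (bump3 suc (PySem.List.pyGetD w ((k : Int) - 1) "") labp u, pre, pc)) := by
  induction rest with
  | nil =>
    intro k hk hdrop suc pre pc labp
    have hlen : w.length ≤ k := List.drop_eq_nil_iff.mp hdrop
    rw [PySem.List.pyRange_one_eq_nil (by simp only [PySem.List.len_eq]; exact_mod_cast hlen)]
    simp [walkB]
  | cons u rest' ih =>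
    intro k hk hdrop suc pre pc labp
    have hk_lt : k < w.length := by
      have := congrArg List.length hdrop; simp at this; omega
    have hu : w[k]? = some u := by
      have h0 : (w.drop k)[0]? = some u := by rw [hdrop]; rfl
      rwa [List.getElem?_drop, Nat.add_zero] at h0
    have hdrop' : w.drop (k+1) = rest' := by
      have h1 : w.drop (k+1) = (w.drop k).drop 1 := by rw [List.drop_drop]
      rw [h1, hdrop]; rfl
    have hgetk : PySem.List.pyGetD w (k : Int) "" = u := by
      simp [List.getD_eq_getElem?_getD, hu]
    have hrest_len : rest'.length + 1 = w.length - k := by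
      have := congrArg List.length hdrop; simp at this; omega
    -- peel index k on the A side
    rw [PySem.List.pyRange_one_cons (by simp only [PySem.List.len_eq]; exact_mod_cast hk_lt),
        List.foldl_cons]
    -- unfold one step of walkB
    rw [walkB]
    cases rest' with
    | nil =>
      simp only [List.length_nil] at hrest_len
      have hklen : k + 1 = w.length := by omega
      rw [PySem.List.pyRange_one_eq_nil
        (by simp only [PySem.List.len_eq]; omega)]
      simp only [walkB, List.foldl_nil, List.isEmpty_nil, if_true, Option.getD_some]
      simp only [stepA, PySem.List.len_eq, hgetk]
      rw [if_neg (by omega : ¬((k:Int) = 0)), if_pos (by omega : (k:Int) = (w.length:Int) - 1),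
          if_neg (by omega : ¬((k:Int) < (w.length:Int) - 1)), if_pos (by omega : (0:Int) < (k:Int))]
    | cons u' rest'' =>
      simp only [List.length_cons] at hrest_len
      have hu' : w[k+1]? = some u' := by
        have h0 : (w.drop (k+1))[0]? = some u' := by rw [hdrop']; rfl
        rwa [List.getElem?_drop, Nat.add_zero] at h0
      have hgetk1 : PySem.List.pyGetD w ((k:Int) + 1) "" = u' := by
        obtain ⟨h, he⟩ := List.getElem?_eq_some_iff.mp hu'
        rw [PySem.List.pyGetD_eq_getElem w "" (by omega) (by omega)]
        have ht : ((k:Int) + 1).toNat = k + 1 := by omega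
        simp_rw [ht]
        exact he
      have := ih (k+1) (by omega) hdrop'
        (bump3 suc (PySem.List.pyGetD w ((k:Int) - 1) "") labp u)
        (bump3 pre u "M" (PySem.List.pyGetD w ((k:Int) - 1) ""))
        (bump2 pc u "M") "M"
      rw [show ((k+1:Nat):Int) - 1 = (k:Int) by push_cast; ring] at this
      rw [hgetk] at this
      simp only [List.isEmpty_cons, Bool.false_eq_true, if_false, Option.getD_some]
      rw [this]
      simp only [stepA, PySem.List.len_eq, hgetk, hgetk1]
      rw [if_neg (by omega : ¬((k:Int) = 0)), if_neg (by omega : ¬((k:Int) = (w.length:Int) - 1)),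
          if_pos (by omega : (k:Int) < (w.length:Int) - 1), if_pos (by omega : (0:Int) < (k:Int))]
      norm_cast

theorem walkB_top (w : List String) (suc pre : CD) (pc : PD) :
    walkB suc pre pc none none w =
      (PySem.List.pyRange 0 (PySem.List.len w) 1).foldl (stepA w) (suc, pre, pc) := by
  cases w with
  | nil =>
    rw [PySem.List.pyRange_one_eq_nil (by simp [PySem.List.len_eq])]
    simp [walkB]
  | cons u rest =>
    rw [PySem.List.pyRange_one_cons (by simp only [PySem.List.len_eq, List.length_cons]; push_cast; omega),
        List.foldl_cons, walkB]
    cases rest with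
    | nil =>
      rw [PySem.List.pyRange_one_eq_nil (by norm_num [PySem.List.len_eq])]
      simp only [walkB, List.foldl_nil]
      simp only [stepA, PySem.List.len_eq, PySem.List.pyGetD_zero_cons]
      norm_num
    | cons u' rest' =>
      have hdrop1 : (u::u'::rest').drop 1 = u'::rest' := rfl
      have h := walkB_eq_fold (u::u'::rest') (u'::rest') 1 (le_refl 1) hdrop1 suc pre (bump2 pc u "I") "I"
      rw [show ((1:Nat):Int) - 1 = (0:Int) by norm_num] at h
      rw [PySem.List.pyGetD_zero_cons] at h
      rw [h]
      have hget1 : PySem.List.pyGetD (u::u'::rest') ((0:Int)+1) "" = u' := by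
        rw [show ((0:Int)+1) = ((1:Nat):Int) by norm_num, PySem.List.pyGetD_natCast]
        rfl
      simp only [stepA, PySem.List.len_eq, PySem.List.pyGetD_zero_cons, hget1]
      norm_num

theorem extract_eq (unit_sequences : List (List String)) (min_units : Int) :
    extract_context_by_position unit_sequences min_units =
      extract_context_by_position_alt unit_sequences min_units := by
  simp only [extract_context_by_position, extract_context_by_position_alt]
  refine congrArg (fun p : CD × CD × PD => (dump3 p.1, dump3 p.2.1, dump2 p.2.2)) ?_
  refine PySem.List.foldl_congr_mem _ _ _ _ ?_
  intro acc w _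
  by_cases h : PySem.List.len w < min_units
  · rw [if_pos h, if_pos h]
  · rw [if_neg h, if_neg h, walkB_top]
    rfl

-- ===== VERDICT (by name: the statement is the Claim_ definition above) =====
theorem extract_context_by_position_spec : Claim_equal_extract_context_by_position := by
  intro us m _
  unfold Spec_extract_context_by_position
  exact extract_eq us m
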